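-- pv_equiv track=rewrite | github.com/NavodPeiris/GraphSense-Research | dataset/maths/special_numbers/automorphic_number.py | is_automorphic_number
-- ===== SOURCE A (Python) =====
-- def is_automorphic_number(number: int) -> bool:
--     if not isinstance(number, int):
--         msg = f"Input value of [number={number}] must be an integer"
--         raise TypeError(msg)
--     if number < 0:
--         return False
--     number_square = number * number
--     while number > 0:
--         if number % 10 != number_square % 10:
--             return False
--         number //= 10
--         number_square //= 10
--     return True
-- ===== SOURCE B (Python) =====
-- def is_automorphic_number(number: int) -> bool:
--     if not isinstance(number, int):
--         msg = f"Input value of [number={number}] must be an integer"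
--         raise TypeError(msg)
--     if number < 0:
--         return False
--     m = 10
--     while m <= number:
--         m *= 10
--     return (number * number) % m == number
-- ===== Notes on version B (the rewrite author's own statement) =====
-- stated objective: alternative
-- what changed: Instead of extracting and comparing the digits of number and its square one by one, B computes the smallest power of ten exceeding number and performs a single modular check (number*number) % m == number.
import Mathlib
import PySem

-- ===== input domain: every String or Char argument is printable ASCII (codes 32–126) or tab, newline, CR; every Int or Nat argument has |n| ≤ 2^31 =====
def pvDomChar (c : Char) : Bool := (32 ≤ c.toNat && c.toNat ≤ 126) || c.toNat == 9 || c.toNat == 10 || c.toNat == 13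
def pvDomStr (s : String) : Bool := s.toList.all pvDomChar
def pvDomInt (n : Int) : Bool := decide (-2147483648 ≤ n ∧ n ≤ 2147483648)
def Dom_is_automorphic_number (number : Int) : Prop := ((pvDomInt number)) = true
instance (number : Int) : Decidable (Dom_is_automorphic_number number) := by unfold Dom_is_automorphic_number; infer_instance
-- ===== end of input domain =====

-- B replaces A's per-digit comparison loop by one loop computing the smallest power of ten
-- exceeding number, followed by a single modular check (alternative algorithm, similar cost).

-- ===== PORT A =====
-- A's while loop: compares last digits of number and its square, then drops them from both
def pvALoop (number number_square : Int) : Bool :=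
  if number > 0 then
    if PySem.Int.mod number 10 ≠ PySem.Int.mod number_square 10 then false
    else pvALoop (PySem.Int.floordiv number 10) (PySem.Int.floordiv number_square 10)
  else true
termination_by number.toNat
decreasing_by
  rw [PySem.Int.floordiv_eq_ediv_of_pos (by norm_num)]
  omega

def is_automorphic_number (number : Int) : Bool :=
  if number < 0 then false
  else pvALoop number (number * number)

-- ===== PORT B =====
-- B's while loop: m *= 10 while m <= number (m stays positive, carried as a hypothesis)
def pvBLoop (number m : Int) (hm : 0 < m) : Int :=
  if m ≤ number then pvBLoop number (m * 10) (by omega) else m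
termination_by (number + 1 - m).toNat
decreasing_by omega

def is_automorphic_number_alt (number : Int) : Bool :=
  if number < 0 then false
  else PySem.Int.mod (number * number) (pvBLoop number 10 (by norm_num)) == number

-- ===== PRECONDITION & SPEC =====
def Spec_is_automorphic_number (number : Int) (out : Bool) : Prop := out = is_automorphic_number_alt number
instance (number : Int) (out : Bool) : Decidable (Spec_is_automorphic_number number out) := by unfold Spec_is_automorphic_number; infer_instance

-- ===== CLAIM (what is proved, stated in full; the proofs are below) =====
def Claim_equal_is_automorphic_number : Prop := ∀ (number : Int), Dom_is_automorphic_number number → Spec_is_automorphic_number number (is_automorphic_number number)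

-- ===== LEMMAS AND PROOFS =====

-- number of decimal digits of n (0 for n ≤ 0); the depth of A's loop
def pvLen (n : Int) : Nat :=
  if 0 < n then pvLen (n / 10) + 1 else 0
termination_by n.toNat
decreasing_by omega

lemma pvALoop_iff (n sq : Int) (hn : 0 ≤ n) :
    pvALoop n sq = true ↔ (10 : Int) ^ pvLen n ∣ (sq - n) := by
  have h10 : (0:Int) < 10 := by norm_num
  fun_induction pvALoop n sq with
  | case1 n sq h hd =>
    -- digits differ: result false
    rw [PySem.Int.mod_eq_emod_of_pos h10, PySem.Int.mod_eq_emod_of_pos h10] at hd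
    simp only [ne_eq] at hd
    constructor
    · intro hf; exact absurd hf (by simp)
    · intro hdvd
      exfalso
      have hl : pvLen n = pvLen (n/10) + 1 := by rw [pvLen]; simp [h]
      rw [hl] at hdvd
      have h10d : (10:Int) ∣ (sq - n) := dvd_trans (dvd_pow_self 10 (Nat.succ_ne_zero _)) hdvd
      omega
  | case2 n sq h hd ih =>
    rw [PySem.Int.mod_eq_emod_of_pos h10, PySem.Int.mod_eq_emod_of_pos h10] at hd
    simp only [ne_eq, not_not] at hd
    rw [PySem.Int.floordiv_eq_ediv_of_pos h10, PySem.Int.floordiv_eq_ediv_of_pos h10] at ih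
    have hn' : (0:Int) ≤ n / 10 := by omega
    have hiff := ih hn'
    have hl : pvLen n = pvLen (n/10) + 1 := by rw [pvLen]; simp [h]
    rw [hl]
    have hdec : sq - n = 10 * (sq/10 - n/10) := by omega
    rw [PySem.Int.floordiv_eq_ediv_of_pos h10, PySem.Int.floordiv_eq_ediv_of_pos h10]
    simp only [hiff]
    rw [hdec, pow_succ, mul_comm ((10:Int)^pvLen (n/10)) 10]
    exact (mul_dvd_mul_iff_left (by norm_num : (10:Int) ≠ 0)).symm
  | case3 n sq h =>
    have hn0 : n = 0 := by omega
    subst hn0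
    have : pvLen (0:Int) = 0 := by rw [pvLen]; simp
    rw [this]
    simp

lemma pvBLoop_char (n m : Int) (hm : 0 < m) :
    n < pvBLoop n m hm ∧ ∃ k : Nat, pvBLoop n m hm = m * 10 ^ k ∧ ∀ j < k, m * 10 ^ j ≤ n := by
  fun_induction pvBLoop n m hm with
  | case1 m hm hle ih =>
    obtain ⟨hlt, k, hk, hall⟩ := ih
    refine ⟨hlt, k + 1, by rw [hk]; ring, ?_⟩
    intro j hj
    cases j with
    | zero => simpa using hle
    | succ i =>
      have h2 := hall i (by omega)
      have h3 : m * 10 ^ (i + 1) = m * 10 * 10 ^ i := by ring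
      linarith
  | case2 m hm h => exact ⟨by omega, 0, by simp, by omega⟩

lemma pvLen_pos_bound (n : Int) (hn : 0 ≤ n) : n < 10 ^ pvLen n := by
  fun_induction pvLen n with
  | case1 n h ih =>
    have h2 : (0:Int) ≤ n / 10 := by omega
    have := ih h2
    have hb : n < (n / 10) * 10 + 10 := by omega
    calc n < (n/10)*10 + 10 := hb
      _ ≤ (10 ^ pvLen (n/10) - 1) * 10 + 10 := by nlinarith [this]
      _ = 10 ^ (pvLen (n/10) + 1) := by ring
  | case2 n h => simp at h ⊢; omega

lemma pvLen_lower (n : Int) (hn : 1 ≤ n) : 10 ^ (pvLen n - 1) ≤ n := by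
  fun_induction pvLen n with
  | case1 n h ih =>
    by_cases h10 : 10 ≤ n
    · have h1 : (1:Int) ≤ n / 10 := by omega
      have hlp : 1 ≤ pvLen (n/10) := by
        rw [pvLen]; simp only [if_pos (by omega : (0:Int) < n/10)]; omega
      have : (10:Int) ^ (pvLen (n/10)) ≤ n := by
        calc (10:Int) ^ pvLen (n/10) = 10 ^ (pvLen (n/10) - 1) * 10 := by
              rw [← pow_succ]; congr 1; omega
          _ ≤ (n/10) * 10 := by nlinarith [ih h1]
          _ ≤ n := by omega
      simpa using this
    · have hz : n / 10 = 0 := by omega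
      rw [hz]
      have hp : pvLen (0:Int) = 0 := by rw [pvLen]; simp
      rw [hp]; simpa using hn
  | case2 n h => omega

lemma pvLen_ge_one (n : Int) (hn : 1 ≤ n) : 1 ≤ pvLen n := by
  rw [pvLen]; simp only [if_pos (by omega : (0:Int) < n)]; omega

lemma pvBLoop_eq_pow (n : Int) (hn : 1 ≤ n) :
    pvBLoop n 10 (by norm_num) = 10 ^ pvLen n := by
  obtain ⟨hlt, k, hk, hall⟩ := pvBLoop_char n 10 (by norm_num)
  have hk' : pvBLoop n 10 (by norm_num) = 10 ^ (k + 1) := by rw [hk]; ring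
  have hlow : (10:Int) ^ k ≤ n := by
    cases k with
    | zero => simpa using hn
    | succ i =>
      have := hall i (by omega)
      calc (10:Int) ^ (i+1) = 10 * 10 ^ i := by ring
        _ ≤ n := this
  have hL1 : 1 ≤ pvLen n := pvLen_ge_one n hn
  have hup : n < 10 ^ pvLen n := pvLen_pos_bound n (by omega)
  have hlo : 10 ^ (pvLen n - 1) ≤ n := pvLen_lower n hn
  have hkL : k + 1 = pvLen n := by
    by_contra hne
    rcases Nat.lt_or_ge (k+1) (pvLen n) with h | h
    · have : (10:Int) ^ (k+1) ≤ 10 ^ (pvLen n - 1) :=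
        pow_le_pow_right₀ (by norm_num) (by omega)
      rw [hk'] at hlt; linarith
    · have hlt2 : pvLen n ≤ k := by omega
      have : (10:Int) ^ (pvLen n) ≤ 10 ^ k :=
        pow_le_pow_right₀ (by norm_num) hlt2
      linarith
  rw [hk', hkL]

-- ===== VERDICT (by name: the statement is the Claim_ definition above) =====
theorem is_automorphic_number_spec : Claim_equal_is_automorphic_number := by
  unfold Claim_equal_is_automorphic_number Spec_is_automorphic_number
  intro n _hdom
  show is_automorphic_number n = is_automorphic_number_alt n
  unfold is_automorphic_number is_automorphic_number_alt
  by_cases hneg : n < 0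
  · simp [hneg]
  · simp only [if_neg hneg]
    by_cases h0 : n = 0
    · subst h0
      have h1 : pvALoop 0 (0 * 0) = true := by rw [pvALoop]; simp
      have h2 : pvBLoop (0:Int) 10 (by norm_num) = 10 := by rw [pvBLoop]; simp
      rw [h1, h2]
      rw [PySem.Int.mod_eq_emod_of_pos (by norm_num)]
      simp
    · have hn1 : (1:Int) ≤ n := by omega
      have hM := pvBLoop_eq_pow n hn1
      rw [hM, PySem.Int.mod_eq_emod_of_pos (by positivity)]
      have hup : n < 10 ^ pvLen n := pvLen_pos_bound n (by omega)
      have key := pvALoop_iff n (n * n) (by omega)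
      have hmod : n % (10 ^ pvLen n) = n := Int.emod_eq_of_lt (by omega) hup
      have hiff2 : (n * n) % 10 ^ pvLen n = n ↔ (10:Int) ^ pvLen n ∣ (n * n - n) := by
        constructor
        · intro h
          have : (n * n) % 10 ^ pvLen n = n % 10 ^ pvLen n := by rw [h, hmod]
          have hmq : n * n ≡ n [ZMOD (10 ^ pvLen n)] := this
          obtain ⟨c, hc⟩ := Int.ModEq.dvd hmq
          exact ⟨-c, by linarith⟩
        · intro h
          have hmq : n * n ≡ n [ZMOD (10 ^ pvLen n)] := by
            have : (10:Int) ^ pvLen n ∣ (n - n * n) := by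
              obtain ⟨c, hc⟩ := h; exact ⟨-c, by linarith⟩
            exact (Int.modEq_iff_dvd.mpr this)
          calc (n*n) % 10 ^ pvLen n = n % 10 ^ pvLen n := hmq
            _ = n := hmod
      have : pvALoop n (n * n) = ((n * n) % 10 ^ pvLen n == n) := by
        by_cases hA : (10:Int) ^ pvLen n ∣ (n * n - n)
        · rw [key.mpr hA]
          exact (beq_iff_eq.mpr (hiff2.mpr hA)).symm
        · have e1 : pvALoop n (n*n) = false := by
            cases hE : pvALoop n (n*n)
            · rfl
            · exact absurd (key.mp hE) hA
          have e2 : ((n * n) % 10 ^ pvLen n == n) = false := by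
            rw [beq_eq_false_iff_ne]
            intro hc; exact hA (hiff2.mp hc)
          rw [e1, e2]
      exact this
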